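-- pv_equiv track=rewrite | github.com/vhvistad/advent_of_code | knowit/2020/3/main.py | diagonal_scan
-- ===== SOURCE A (Python) =====
-- def check_string(word, candidate):
--   string = ""
--   candidate = string.join(candidate)
--   return candidate == word or candidate[::-1] == word
--
-- def diagonal_scan(word, matrix):
--   for y in range(len(matrix)-len(word)+1):
--     for x in range(len(word)-1, len(matrix[y])):
--       candidate = []
--       for char in range(len(word)):
--         candidate.append(matrix[y+char][x-char])
--       if check_string(word, candidate):
--         return True
--   return False
-- ===== SOURCE B (Python) =====
-- def diagonal_scan(word, matrix):
--     # Extract each anti-diagonal d (cells (y, d-y)) once, clamped to the rows it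
--     # can intersect; missing cells of ragged rows become a '\x00' separator,
--     # which printable text never contains.  Then one substring search per
--     # diagonal, in both directions.
--     rows = len(matrix)
--     width = max((len(row) for row in matrix), default=0)
--     if width < len(word) or rows < len(word):
--         return False  # no length-len(word) anti-diagonal window fits in the grid
--     rev = word[::-1]
--     for d in range(rows + width):
--         ylo = 0 if d < width else d - width + 1
--         yhi = min(rows, d + 1)
--         diag = ''.join(
--             matrix[y][d - y] if 0 <= d - y < len(matrix[y]) else '\x00'
--             for y in range(ylo, yhi))
--         if word in diag or rev in diag:
--             return True
--     return False
-- ===== Notes on version B (the rewrite author's own statement) =====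
-- stated objective: alternative
-- what changed: instead of rebuilding a len(word)-long candidate list for every cell, B extracts each anti-diagonal once (missing cells of ragged rows become a '\x00' separator) and runs one substring search per diagonal, in both directions, after a cheap no-window-fits guard
import Mathlib
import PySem

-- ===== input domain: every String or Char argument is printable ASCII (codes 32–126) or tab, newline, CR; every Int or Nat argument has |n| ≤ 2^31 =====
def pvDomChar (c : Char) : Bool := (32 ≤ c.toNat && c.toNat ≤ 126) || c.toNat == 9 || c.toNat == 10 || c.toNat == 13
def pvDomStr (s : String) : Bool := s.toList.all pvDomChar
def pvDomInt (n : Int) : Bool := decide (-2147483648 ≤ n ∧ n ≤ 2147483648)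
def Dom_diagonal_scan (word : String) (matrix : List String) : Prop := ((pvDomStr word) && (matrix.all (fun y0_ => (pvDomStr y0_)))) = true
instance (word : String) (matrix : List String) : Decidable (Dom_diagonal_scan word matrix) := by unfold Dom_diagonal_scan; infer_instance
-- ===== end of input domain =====

-- B extracts each anti-diagonal once and runs one substring search per diagonal in both
-- directions (objective: alternative); equality of the RETURN value is what is proved.

-- ===== PORT A =====
-- check_string(word, candidate): ''.join of a list of 1-char strings is that char list;
-- candidate[::-1] is List.reverse (PySem.List.slice?_none_none_neg_one).
def check_string (word : List Char) (candidate : List Char) : Bool :=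
  candidate == word || candidate.reverse == word

-- the two early-return for-loops become `any`; the candidate-building append loop a `map`
def diagonal_scan (word : String) (matrix : List String) : Bool :=
  let W := word.toList
  (PySem.List.pyRange 0 ((matrix.length : Int) - (W.length : Int) + 1) 1).any (fun y =>
    let row := ((PySem.List.pyGet? matrix y).getD "").toList
    (PySem.List.pyRange ((W.length : Int) - 1) (row.length : Int) 1).any (fun x =>
      let candidate := (PySem.List.pyRange 0 (W.length : Int) 1).map (fun c =>
        (PySem.List.pyGet? (((PySem.List.pyGet? matrix (y + c)).getD "").toList) (x - c)).getD ' ')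
      check_string W candidate))

-- ===== PORT B =====
-- transliteration of Source B: no window fits if every row is shorter than the word or there are
-- fewer rows than word letters; otherwise anti-diagonal d holds, for each intersecting row y,
-- the cell (y, d-y) or the separator '\x00' when that cell does not exist (ragged rows);
-- `word in diag` is PySem.Chars.isIn
def diagonal_scan_alt (word : String) (matrix : List String) : Bool :=
  let W := word.toList
  let rows := matrix.length
  let width := PySem.List.maxD (matrix.map (fun row => (row.toList.length : Int))) id 0
  if width < (W.length : Int) ∨ (rows : Int) < (W.length : Int) then false
  else
    let rev := W.reverse
    (PySem.List.pyRange 0 ((rows : Int) + width) 1).any (fun d =>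
      let ylo := if d < width then 0 else d - width + 1
      let yhi := min ((rows : Int)) (d + 1)
      let diag := (PySem.List.pyRange ylo yhi 1).map (fun y =>
        let row := ((PySem.List.pyGet? matrix y).getD "").toList
        let x := d - y
        if 0 ≤ x ∧ x < (row.length : Int) then (PySem.List.pyGet? row x).getD ' ' else '\x00')
      PySem.Chars.isIn W diag || PySem.Chars.isIn rev diag)

-- ===== PRECONDITION & SPEC =====

-- row y of the matrix as a char list ("" when y is out of range)
def pvRow (matrix : List String) (y : Nat) : List Char := (matrix.getD y "").toList

-- the length-L anti-diagonal window starting at (y,x), read downward-left (' ' off-grid)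
def pvWinChars (matrix : List String) (L y x : Nat) : List Char :=
  (List.range L).map (fun c => (pvRow matrix (y + c)).getD (x - c) ' ')

-- does every cell of the window (y,x) exist in the (possibly ragged) matrix?
def pvValidWinB (matrix : List String) (L y x : Nat) : Bool :=
  (List.range L).all (fun c => decide (x - c < (pvRow matrix (y + c)).length))

-- a fully-present window that spells W forwards or backwards
def pvMatchWinB (W : List Char) (matrix : List String) (y x : Nat) : Bool :=
  pvValidWinB matrix W.length y x &&
    (pvWinChars matrix W.length y x == W || (pvWinChars matrix W.length y x).reverse == W)

-- every invalid window (y,x) in A's scan range is preceded, in A's y-then-x scan order,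
-- by a fully-present matching window (y',x')
def pvPreScanB (W : List Char) (matrix : List String) : Bool :=
  (List.range (matrix.length + 1)).all (fun y =>
    !decide (y + W.length ≤ matrix.length) ||
    (List.range (pvRow matrix y).length).all (fun x =>
      !decide (W.length ≤ x + 1) || pvValidWinB matrix W.length y x ||
      (List.range (y + 1)).any (fun y' =>
        (List.range (pvRow matrix y').length).any (fun x' =>
          decide (W.length ≤ x' + 1) && (decide (y' < y) || decide (x' ≤ x)) &&
            pvMatchWinB W matrix y' x'))))

-- Pre_ excludes exactly the inputs on which Python A raises IndexError: the empty word on the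
-- empty matrix, and ragged matrices where A's scan reaches a window running off a short row
-- before any earlier-scanned window matched (pvPreScanB).
def Pre_diagonal_scan (word : String) (matrix : List String) : Prop :=
  (word = "" → matrix ≠ []) ∧ pvPreScanB word.toList matrix = true
instance (word : String) (matrix : List String) : Decidable (Pre_diagonal_scan word matrix) := by
  unfold Pre_diagonal_scan; infer_instance

def pvWitness_diagonal_scan : String × List String := ("ab", ["xa", "bz"])

def Spec_diagonal_scan (word : String) (matrix : List String) (out : Bool) : Prop := out = diagonal_scan_alt word matrix
instance (word : String) (matrix : List String) (out : Bool) : Decidable (Spec_diagonal_scan word matrix out) := by unfold Spec_diagonal_scan; infer_instance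

-- ===== CLAIM (what is proved, stated in full; the proofs are below) =====
def Claim_equal_diagonal_scan : Prop := ∀ (word : String) (matrix : List String), Dom_diagonal_scan word matrix → Pre_diagonal_scan word matrix → Spec_diagonal_scan word matrix (diagonal_scan word matrix)

-- ===== LEMMAS AND PROOFS =====

-- "somewhere in the grid there is a length-|V| anti-diagonal window, read downward-left,
-- whose cells all exist and spell V"
def pvFound (matrix : List String) (V : List Char) : Prop :=
  ∃ y x : Nat, y + V.length ≤ matrix.length ∧
    (∀ c < V.length, c ≤ x ∧ x - c < (pvRow matrix (y + c)).length) ∧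
    pvWinChars matrix V.length y x = V

-- every window A's scan ranges over has all its cells present
def pvNoBad (W : List Char) (matrix : List String) : Prop :=
  ∀ y x : Nat, y + W.length ≤ matrix.length → W.length ≤ x + 1 →
    x < (pvRow matrix y).length → pvValidWinB matrix W.length y x = true

-- the widest row length, as B computes it
def pvWidth (matrix : List String) : Int :=
  PySem.List.maxD (matrix.map (fun row => (row.toList.length : Int))) id 0

-- the character B places at row y of anti-diagonal d
def pvCellG (matrix : List String) (d : Int) (y : Nat) : Char :=
  if 0 ≤ d - (y : Int) ∧ d - (y : Int) < ((pvRow matrix y).length : Int)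
  then (pvRow matrix y).getD (d - (y : Int)).toNat ' ' else '\x00'

-- the full (unclamped) diagonal over all rows, and B's clamped one
def pvDiagN (matrix : List String) (d : Int) : List Char :=
  (List.range matrix.length).map (pvCellG matrix d)

def pvYlo (matrix : List String) (d : Int) : Nat :=
  (if d < pvWidth matrix then 0 else d - pvWidth matrix + 1).toNat
def pvYhi (matrix : List String) (d : Int) : Nat :=
  (min ((matrix.length : Int)) (d + 1)).toNat

def pvDiagT (matrix : List String) (d : Int) : List Char :=
  (List.range (pvYhi matrix d - pvYlo matrix d)).map
    (fun k => pvCellG matrix d (pvYlo matrix d + k))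

theorem pv_width_def (matrix : List String) :
    PySem.List.maxD (matrix.map (fun row => (row.toList.length : Int))) id 0 = pvWidth matrix := rfl

theorem pv_width_nonneg (matrix : List String) : 0 ≤ pvWidth matrix := by
  rw [pvWidth, PySem.List.maxD]
  cases hm : PySem.List.max? (matrix.map (fun row => (row.toList.length : Int))) id with
  | none => simp
  | some m =>
    have hmem : m ∈ matrix.map (fun row => (row.toList.length : Int)) := PySem.List.max?_mem hm
    simp at hmem
    obtain ⟨r, _, hr⟩ := hmem
    simp [← hr]

theorem pv_len_le_width (matrix : List String) (y : Nat) (hy : y < matrix.length) :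
    ((pvRow matrix y).length : Int) ≤ pvWidth matrix := by
  cases hm : PySem.List.max? (matrix.map (fun row => (row.toList.length : Int))) id with
  | none =>
    rw [PySem.List.max?_eq_none_iff, List.map_eq_nil_iff] at hm
    rw [hm] at hy
    simp at hy
  | some m =>
    have hmem : ((pvRow matrix y).length : Int) ∈ matrix.map (fun row => (row.toList.length : Int)) := by
      refine List.mem_map.mpr ⟨matrix[y], List.getElem_mem hy, ?_⟩
      rw [pvRow, List.getD_eq_getElem?_getD, List.getElem?_eq_getElem hy]
      rfl
    have := PySem.List.max?_isMax hm _ hmem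
    rw [pvWidth, PySem.List.maxD, hm]
    simpa using this

-- windows characterisation of infix
theorem pv_infix_iff_window (V l : List Char) :
    V <:+: l ↔ ∃ i, i + V.length ≤ l.length ∧ ∀ c < V.length, l[i + c]? = V[c]? := by
  constructor
  · rintro ⟨s, t, rfl⟩
    refine ⟨s.length, by simp, fun c hc => ?_⟩
    rw [List.getElem?_append_left (by simp; omega), List.getElem?_append_right (by omega)]
    congr 1
    omega
  · rintro ⟨i, hlen, h⟩
    have hV : V = (l.drop i).take V.length := by
      apply List.ext_getElem?
      intro c
      by_cases hc : c < V.length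
      · rw [List.getElem?_take_of_lt hc, List.getElem?_drop, ← h c hc]
      · rw [List.getElem?_eq_none_iff.mpr (by omega), List.getElem?_eq_none_iff.mpr (by simp; omega)]
    obtain ⟨n, hn⟩ : ∃ n, V.length = n := ⟨_, rfl⟩
    have hV' : V = (l.drop i).take n := by rw [← hn]; exact hV
    refine ⟨l.take i, l.drop (i + n), ?_⟩
    rw [hV', List.append_assoc]
    have hd : l.drop (i + n) = (l.drop i).drop n := by rw [List.drop_drop, Nat.add_comm]
    rw [hd, List.take_append_drop, List.take_append_drop]

-- the row expression used by both ports equals pvRow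
theorem pv_row_eq (matrix : List String) (y : Nat) :
    ((PySem.List.pyGet? matrix (y : Int)).getD "").toList = pvRow matrix y := by
  rw [PySem.List.pyGet?_natCast, pvRow, List.getD_eq_getElem?_getD]

-- the diagonal string B builds equals pvDiagT
theorem pv_body_eq (matrix : List String) (d : Int) (y : Nat) :
    (fun (y : Int) =>
      let row := ((PySem.List.pyGet? matrix y).getD "").toList
      let x := d - y
      if 0 ≤ x ∧ x < (row.length : Int) then (PySem.List.pyGet? row x).getD ' ' else '\x00')
      ((y : Nat) : Int)
    = pvCellG matrix d y := by
  simp only [pv_row_eq, pvCellG]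
  by_cases h : 0 ≤ d - (y : Int) ∧ d - (y : Int) < ((pvRow matrix y).length : Int)
  · rw [if_pos h, if_pos h, PySem.List.pyGet?_of_nonneg _ h.1, List.getD_eq_getElem?_getD]
  · rw [if_neg h, if_neg h]

theorem pv_diag_eq (matrix : List String) (d : Int) :
    ((PySem.List.pyRange (if d < pvWidth matrix then 0 else d - pvWidth matrix + 1)
        (min ((matrix.length : Int)) (d + 1)) 1).map (fun y =>
      let row := ((PySem.List.pyGet? matrix y).getD "").toList
      let x := d - y
      if 0 ≤ x ∧ x < (row.length : Int) then (PySem.List.pyGet? row x).getD ' ' else '\x00'))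
    = pvDiagT matrix d := by
  have h0 := pv_width_nonneg matrix
  by_cases hd : d < -1
  · rw [if_pos (by omega), PySem.List.pyRange_one_eq_nil (by omega), List.map_nil]
    have h1 : pvYhi matrix d = 0 := by unfold pvYhi; omega
    simp [pvDiagT, h1]
  · have ha : (if d < pvWidth matrix then 0 else d - pvWidth matrix + 1)
        = ((pvYlo matrix d : Nat) : Int) := by
      unfold pvYlo
      split_ifs <;> omega
    have hb : min ((matrix.length : Int)) (d + 1) = ((pvYhi matrix d : Nat) : Int) := by
      unfold pvYhi
      omega
    rw [ha, hb, PySem.List.pyRange_one, List.map_map]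
    have hc : (((pvYhi matrix d : Nat) : Int) - ((pvYlo matrix d : Nat) : Int)).toNat
        = pvYhi matrix d - pvYlo matrix d := by omega
    rw [hc, pvDiagT]
    apply List.map_congr_left
    intro k _
    have hy : ((pvYlo matrix d : Nat) : Int) + (k : Int) = ((pvYlo matrix d + k : Nat) : Int) := by
      push_cast
      ring
    simp only [Function.comp_apply, hy, pv_body_eq]

theorem pv_diagN_length (matrix : List String) (d : Int) :
    (pvDiagN matrix d).length = matrix.length := by
  simp [pvDiagN]

theorem pv_diagN_getElem? (matrix : List String) (d : Int) (y : Nat) (hy : y < matrix.length) :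
    (pvDiagN matrix d)[y]? = some (if 0 ≤ d - (y : Int) ∧ d - (y : Int) < ((pvRow matrix y).length : Int)
      then (pvRow matrix y).getD (d - (y : Int)).toNat ' ' else '\x00') := by
  simp [pvDiagN, pvCellG, hy]

theorem pv_diagT_length (matrix : List String) (d : Int) :
    (pvDiagT matrix d).length = pvYhi matrix d - pvYlo matrix d := by
  simp [pvDiagT]

theorem pv_diagT_getElem? (matrix : List String) (d : Int) (i : Nat)
    (hi : i < pvYhi matrix d - pvYlo matrix d) :
    (pvDiagT matrix d)[i]? = some (pvCellG matrix d (pvYlo matrix d + i)) := by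
  simp [pvDiagT, hi]

-- a window avoiding the separator lies inside the clamped part of the diagonal
theorem pv_infix_T_iff_N (matrix : List String) (d : Int) (V : List Char) (hV : V ≠ [])
    (hs : '\x00' ∉ V) :
    V <:+: pvDiagT matrix d ↔ V <:+: pvDiagN matrix d := by
  have hV1 : 1 ≤ V.length := List.length_pos_iff.mpr hV
  have hyhi : pvYhi matrix d ≤ matrix.length := by unfold pvYhi; omega
  rw [pv_infix_iff_window, pv_infix_iff_window]
  constructor
  · rintro ⟨i, hlen, h⟩
    rw [pv_diagT_length] at hlen
    refine ⟨pvYlo matrix d + i, by rw [pv_diagN_length]; omega, fun c hc => ?_⟩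
    have hT := h c hc
    rw [pv_diagT_getElem? matrix d _ (by omega)] at hT
    rw [pv_diagN_getElem? matrix d _ (by omega), ← hT]
    rw [pvCellG, Nat.add_assoc]
  · rintro ⟨j, hlen, h⟩
    rw [pv_diagN_length] at hlen
    have hcell : ∀ c, ∀ hc : c < V.length, 0 ≤ d - ((j + c : Nat) : Int) ∧
        d - ((j + c : Nat) : Int) < ((pvRow matrix (j + c)).length : Int) := by
      intro c hc
      have h1 := h c hc
      rw [pv_diagN_getElem? matrix d _ (by omega), List.getElem?_eq_getElem hc] at h1
      have h2 := Option.some.inj h1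
      by_cases hcond : 0 ≤ d - ((j + c : Nat) : Int) ∧
          d - ((j + c : Nat) : Int) < ((pvRow matrix (j + c)).length : Int)
      · exact hcond
      · rw [if_neg hcond] at h2
        exact absurd (h2 ▸ List.getElem_mem _) hs
    have hc0 := hcell 0 (by omega)
    simp only [Nat.add_zero] at hc0
    have hcl := hcell (V.length - 1) (by omega)
    have hw := pv_len_le_width matrix j (by omega)
    have hylo : pvYlo matrix d ≤ j := by
      unfold pvYlo
      split_ifs <;> omega
    have hyhi2 : j + V.length ≤ pvYhi matrix d := by
      unfold pvYhi
      have h1 := hcl.1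
      omega
    refine ⟨j - pvYlo matrix d, by rw [pv_diagT_length]; omega, fun c hc => ?_⟩
    have hidx : pvYlo matrix d + (j - pvYlo matrix d + c) = j + c := by omega
    rw [pv_diagT_getElem? matrix d _ (by omega), hidx, ← h c hc,
      pv_diagN_getElem? matrix d _ (by omega), pvCellG]

theorem pv_exists_diag_iff (matrix : List String) (V : List Char) (hV : V ≠ [])
    (hs : '\x00' ∉ V) :
    (∃ d : Int, 0 ≤ d ∧
        d < (matrix.length : Int) + pvWidth matrix ∧
        V <:+: pvDiagN matrix d) ↔ pvFound matrix V := by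
  have hV1 : 1 ≤ V.length := by
    cases V with
    | nil => simp at hV
    | cons a l => simp
  constructor
  · rintro ⟨d, hd0, hdlt, hinf⟩
    rw [pv_infix_iff_window] at hinf
    obtain ⟨i, hlen, h⟩ := hinf
    rw [pv_diagN_length] at hlen
    have hcell : ∀ c, ∀ hc : c < V.length, 0 ≤ d - ((i + c : Nat) : Int) ∧
        d - ((i + c : Nat) : Int) < ((pvRow matrix (i + c)).length : Int) ∧
        (pvRow matrix (i + c)).getD (d - ((i + c : Nat) : Int)).toNat ' ' = V[c]'hc := by
      intro c hc
      have hc1 := h c hc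
      rw [pv_diagN_getElem? matrix d (i + c) (by omega), List.getElem?_eq_getElem hc] at hc1
      have hc2 := Option.some.inj hc1
      by_cases hcond : 0 ≤ d - ((i + c : Nat) : Int) ∧ d - ((i + c : Nat) : Int) < ((pvRow matrix (i + c)).length : Int)
      · rw [if_pos hcond] at hc2
        exact ⟨hcond.1, hcond.2, hc2⟩
      · rw [if_neg hcond] at hc2
        exact absurd (hc2 ▸ List.getElem_mem _) hs
    have hx0 := (hcell 0 (by omega)).1
    refine ⟨i, (d - i).toNat, by omega, ?_, ?_⟩
    · intro c hc
      obtain ⟨h1, h2, _⟩ := hcell c hc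
      constructor
      · omega
      · have he : d - ((i + c : Nat) : Int) = (((d - i).toNat - c : Nat) : Int) := by
          push_cast
          omega
        rw [he] at h2
        exact_mod_cast h2
    · unfold pvWinChars
      apply List.ext_getElem (by simp)
      intro c hc1 hc2
      obtain ⟨h1, h2, h3⟩ := hcell c (by simpa using hc1)
      simp only [List.getElem_map, List.getElem_range]
      rw [← h3]
      congr 1
      omega
  · rintro ⟨y, x, hylen, hcells, hmap⟩
    unfold pvWinChars at hmap
    obtain ⟨hx0, hxrow⟩ := hcells 0 (by omega)
    simp only [Nat.add_zero, Nat.sub_zero] at hx0 hxrow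
    have hyrows : y < matrix.length := by omega
    have hwidth : ((pvRow matrix y).length : Int) ≤ pvWidth matrix :=
      pv_len_le_width matrix y hyrows
    refine ⟨((y + x : Nat) : Int), by positivity, by push_cast; omega, ?_⟩
    rw [pv_infix_iff_window]
    refine ⟨y, by rw [pv_diagN_length]; omega, ?_⟩
    intro c hc
    obtain ⟨hcx, hcrow⟩ := hcells c hc
    rw [pv_diagN_getElem? matrix _ (y + c) (by omega), List.getElem?_eq_getElem hc]
    have he : ((y + x : Nat) : Int) - ((y + c : Nat) : Int) = ((x - c : Nat) : Int) := by
      push_cast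
      omega
    rw [if_pos (by rw [he]; exact ⟨by positivity, by exact_mod_cast hcrow⟩)]
    congr 1
    rw [he]
    have hv := congrArg (fun l => l[c]?) hmap
    simp only [List.getElem?_map, List.getElem?_range, hc] at hv
    rw [List.getElem?_eq_getElem hc] at hv
    have := Option.some.inj (by simpa using hv)
    simp only [Int.toNat_natCast]
    exact this

theorem pv_found_large (matrix : List String) (V : List Char) (hV1 : 1 ≤ V.length)
    (h : pvFound matrix V) :
    (V.length : Int) ≤ pvWidth matrix ∧ V.length ≤ matrix.length := by
  obtain ⟨y, x, hylen, hcells, _⟩ := h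
  obtain ⟨_, hx0⟩ := hcells 0 (by omega)
  simp only [Nat.add_zero, Nat.sub_zero] at hx0
  have hxl := (hcells (V.length - 1) (by omega)).1
  have hw := pv_len_le_width matrix y (by omega)
  exact ⟨by omega, by omega⟩

theorem pv_alt_iff (word : String) (matrix : List String)
    (hW : word.toList ≠ []) (hDom : Dom_diagonal_scan word matrix) :
    (diagonal_scan_alt word matrix = true ↔
      pvFound matrix word.toList ∨ pvFound matrix word.toList.reverse) := by
  have hlw : 1 ≤ word.toList.length := List.length_pos_iff.mpr hW
  have hsW : '\x00' ∉ word.toList := by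
    intro hmem
    unfold Dom_diagonal_scan pvDomStr at hDom
    rw [Bool.and_eq_true] at hDom
    have := List.all_eq_true.mp hDom.1 _ hmem
    simp [pvDomChar] at this
  have hsR : '\x00' ∉ word.toList.reverse := by simpa using hsW
  have hWr : word.toList.reverse ≠ [] := by simpa using hW
  rw [diagonal_scan_alt]
  simp only [pv_width_def]
  by_cases hg : pvWidth matrix < (word.toList.length : Int) ∨
      (matrix.length : Int) < (word.toList.length : Int)
  · rw [if_pos hg]
    constructor
    · intro h
      exact absurd h (by simp)
    · rintro (h | h)
      · obtain ⟨h1, h2⟩ := pv_found_large matrix word.toList hlw h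
        omega
      · obtain ⟨h1, h2⟩ := pv_found_large matrix word.toList.reverse (by simpa using hlw) h
        rw [List.length_reverse] at h1 h2
        omega
  · rw [if_neg hg]
    simp only [List.any_eq_true, Bool.or_eq_true, pv_diag_eq, PySem.Chars.isIn_iff_infix]
    constructor
    · rintro ⟨d, hd, h | h⟩
      · obtain ⟨h0, hlt⟩ := PySem.List.mem_pyRange_one.mp hd
        exact Or.inl ((pv_exists_diag_iff matrix word.toList hW hsW).mp
          ⟨d, h0, hlt, (pv_infix_T_iff_N matrix d word.toList hW hsW).mp h⟩)
      · obtain ⟨h0, hlt⟩ := PySem.List.mem_pyRange_one.mp hd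
        exact Or.inr ((pv_exists_diag_iff matrix word.toList.reverse hWr hsR).mp
          ⟨d, h0, hlt, (pv_infix_T_iff_N matrix d word.toList.reverse hWr hsR).mp h⟩)
    · rintro (h | h)
      · obtain ⟨d, h0, hlt, hinf⟩ := (pv_exists_diag_iff matrix word.toList hW hsW).mpr h
        exact ⟨d, PySem.List.mem_pyRange_one.mpr ⟨h0, hlt⟩,
          Or.inl ((pv_infix_T_iff_N matrix d word.toList hW hsW).mpr hinf)⟩
      · obtain ⟨d, h0, hlt, hinf⟩ := (pv_exists_diag_iff matrix word.toList.reverse hWr hsR).mpr h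
        exact ⟨d, PySem.List.mem_pyRange_one.mpr ⟨h0, hlt⟩,
          Or.inr ((pv_infix_T_iff_N matrix d word.toList.reverse hWr hsR).mpr hinf)⟩

theorem pv_cand_eq (matrix : List String) (n : Nat) (yN xN : Nat) (hx : ∀ c < n, c ≤ xN) :
    (List.range n).map ((fun c : Int =>
        (PySem.List.pyGet? (((PySem.List.pyGet? matrix ((yN : Int) + c)).getD "").toList) ((xN : Int) - c)).getD ' ')
      ∘ (fun k : Nat => (k : Int)))
    = pvWinChars matrix n yN xN := by
  unfold pvWinChars
  apply List.map_congr_left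
  intro c hc
  simp only [Function.comp_apply]
  have h1 : (yN : Int) + (c : Int) = ((yN + c : Nat) : Int) := by push_cast; ring
  have h2 : (xN : Int) - (c : Int) = ((xN - c : Nat) : Int) := by
    have := hx c (List.mem_range.mp hc)
    omega
  rw [h1, pv_row_eq, h2, PySem.List.pyGet?_natCast, List.getD_eq_getElem?_getD]

-- A's port returns true exactly when some window in its scan range spells the word either way
theorem pv_a_true_iff (word : String) (matrix : List String) (hW : word.toList ≠ []) :
    (diagonal_scan word matrix = true ↔
      ∃ y x : Nat, y + word.toList.length ≤ matrix.length ∧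
        word.toList.length ≤ x + 1 ∧ x < (pvRow matrix y).length ∧
        (pvWinChars matrix word.toList.length y x = word.toList ∨
         (pvWinChars matrix word.toList.length y x).reverse = word.toList)) := by
  have hlw : 1 ≤ word.toList.length := List.length_pos_iff.mpr hW
  rw [diagonal_scan]
  simp only [List.any_eq_true, check_string, Bool.or_eq_true, beq_iff_eq,
    PySem.List.pyRange_zero_nat, List.map_map]
  constructor
  · rintro ⟨y, hy, x, hx, hcheck⟩
    obtain ⟨hy0, hy1⟩ := PySem.List.mem_pyRange_one.mp hy
    lift y to Nat using hy0 with yN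
    rw [pv_row_eq] at hx
    obtain ⟨hx0, hx1⟩ := PySem.List.mem_pyRange_one.mp hx
    have hx0' : (0 : Int) ≤ x := by omega
    lift x to Nat using hx0' with xN
    have hcx : ∀ c < word.toList.length, c ≤ xN := by intro c hc; omega
    rw [pv_cand_eq matrix _ yN xN hcx] at hcheck
    exact ⟨yN, xN, by omega, by omega, by exact_mod_cast hx1, hcheck⟩
  · rintro ⟨y, x, hylen, hx1, hxrow, hmatch⟩
    refine ⟨(y : Int), PySem.List.mem_pyRange_one.mpr ⟨by positivity, by omega⟩,
      (x : Int), PySem.List.mem_pyRange_one.mpr ⟨by omega, ?_⟩, ?_⟩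
    · rw [pv_row_eq]
      exact_mod_cast hxrow
    · rw [pv_cand_eq matrix _ y x (fun c hc => by omega)]
      exact hmatch

theorem pv_valid_iff (matrix : List String) (L y x : Nat) :
    pvValidWinB matrix L y x = true ↔ ∀ c < L, x - c < (pvRow matrix (y + c)).length := by
  unfold pvValidWinB
  simp [List.all_eq_true]

-- a fully-present matching window witnesses pvFound for the word or its reverse
theorem pv_win_found (W : List Char) (matrix : List String) (y x : Nat)
    (hylen : y + W.length ≤ matrix.length) (hx1 : W.length ≤ x + 1)
    (hvalid : pvValidWinB matrix W.length y x = true)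
    (hmatch : pvWinChars matrix W.length y x = W ∨ (pvWinChars matrix W.length y x).reverse = W) :
    pvFound matrix W ∨ pvFound matrix W.reverse := by
  have hv := (pv_valid_iff matrix W.length y x).mp hvalid
  have hcells : ∀ c < W.length, c ≤ x ∧ x - c < (pvRow matrix (y + c)).length :=
    fun c hc => ⟨by omega, hv c hc⟩
  rcases hmatch with h | h
  · exact Or.inl ⟨y, x, hylen, hcells, h⟩
  · refine Or.inr ⟨y, x, by simpa using hylen, by simpa using hcells, ?_⟩
    rw [List.length_reverse, ← List.reverse_eq_iff]
    exact h

-- pvFound delivers a window inside A's scan range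
theorem pv_found_win (matrix : List String) (W V : List Char) (hlen : V.length = W.length)
    (hL : 1 ≤ W.length) (hV : pvFound matrix V)
    (hdir : V = W ∨ V.reverse = W) :
    ∃ y x : Nat, y + W.length ≤ matrix.length ∧ W.length ≤ x + 1 ∧ x < (pvRow matrix y).length ∧
      (pvWinChars matrix W.length y x = W ∨ (pvWinChars matrix W.length y x).reverse = W) := by
  obtain ⟨y, x, hylen, hcells, hmap⟩ := hV
  rw [hlen] at hylen hcells hmap
  obtain ⟨_, hx0⟩ := hcells 0 (by omega)
  simp only [Nat.add_zero, Nat.sub_zero] at hx0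
  have hxl := (hcells (W.length - 1) (by omega)).1
  refine ⟨y, x, hylen, by omega, hx0, ?_⟩
  rcases hdir with rfl | h
  · exact Or.inl hmap
  · exact Or.inr (by rw [hmap, h])

theorem pv_prescan_elim (W : List Char) (matrix : List String)
    (h : pvPreScanB W matrix = true) (y x : Nat)
    (hy : y + W.length ≤ matrix.length) (hx : x < (pvRow matrix y).length)
    (hx1 : W.length ≤ x + 1) (hbad : pvValidWinB matrix W.length y x = false) :
    ∃ y', y' ≤ y ∧ ∃ x', W.length ≤ x' + 1 ∧ pvMatchWinB W matrix y' x' = true := by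
  rw [pvPreScanB, List.all_eq_true] at h
  have h1 := h y (List.mem_range.mpr (by omega))
  rw [Bool.or_eq_true, Bool.not_eq_true', decide_eq_false_iff_not] at h1
  rcases h1 with h1 | h1
  · exact absurd hy h1
  rw [List.all_eq_true] at h1
  have h2 := h1 x (List.mem_range.mpr hx)
  rw [Bool.or_eq_true, Bool.or_eq_true, Bool.not_eq_true', decide_eq_false_iff_not] at h2
  rcases h2 with (h2 | h2) | h2
  · exact absurd hx1 h2
  · exact absurd h2 (by simp [hbad])
  rw [List.any_eq_true] at h2
  obtain ⟨y', hy', h3⟩ := h2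
  rw [List.any_eq_true] at h3
  obtain ⟨x', _, h4⟩ := h3
  rw [Bool.and_eq_true, Bool.and_eq_true, decide_eq_true_iff] at h4
  exact ⟨y', by have := List.mem_range.mp hy'; omega, x', h4.1.1, h4.2⟩

theorem pv_empty_case (word : String) (matrix : List String)
    (hW : word.toList = []) (hM : matrix ≠ []) :
    diagonal_scan word matrix = true ∧ diagonal_scan_alt word matrix = true := by
  have hw0 : word.toList.length = 0 := by rw [hW]; rfl
  constructor
  · rw [diagonal_scan]
    apply List.any_eq_true.mpr
    refine ⟨0, PySem.List.mem_pyRange_one.mpr ⟨le_refl _, by rw [hw0]; push_cast; omega⟩, ?_⟩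
    apply List.any_eq_true.mpr
    refine ⟨-1, PySem.List.mem_pyRange_one.mpr ⟨by simp [hw0], by omega⟩, ?_⟩
    rw [hw0]
    simp [check_string, hW]
  · rw [diagonal_scan_alt]
    simp only [pv_width_def]
    have hwidth := pv_width_nonneg matrix
    rw [if_neg (by rw [hw0]; omega)]
    apply List.any_eq_true.mpr
    refine ⟨0, PySem.List.mem_pyRange_one.mpr ⟨le_refl _, by
      have : (1 : Int) ≤ (matrix.length : Int) := by
        have := List.length_pos_iff.mpr hM
        exact_mod_cast this
      omega⟩, ?_⟩
    simp only [hW]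
    simp [PySem.Chars.isIn_nil]

-- ===== VERDICT (by name: the statement is the Claim_ definition above) =====
theorem diagonal_scan_spec : Claim_equal_diagonal_scan := by
  intro word matrix hDom hPre
  unfold Spec_diagonal_scan
  by_cases hW : word.toList = []
  · obtain ⟨h1, h2⟩ := pv_empty_case word matrix hW (hPre.1 (String.toList_eq_nil_iff.mp hW))
    rw [h1, h2]
  · have hlw : 1 ≤ word.toList.length := List.length_pos_iff.mpr hW
    have hA := pv_a_true_iff word matrix hW
    have hB := pv_alt_iff word matrix hW hDom
    by_cases hnb : pvNoBad word.toList matrix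
    · -- every scanned window is fully present: both ports say "a match exists"
      have hiff : diagonal_scan word matrix = true ↔
          pvFound matrix word.toList ∨ pvFound matrix word.toList.reverse := by
        rw [hA]
        constructor
        · rintro ⟨y, x, hylen, hx1, hxrow, hmatch⟩
          exact pv_win_found word.toList matrix y x hylen hx1 (hnb y x hylen hx1 hxrow) hmatch
        · rintro (h | h)
          · exact pv_found_win matrix word.toList word.toList rfl hlw h (Or.inl rfl)
          · exact pv_found_win matrix word.toList word.toList.reverse
              (by simp) hlw h (Or.inr (List.reverse_reverse _))
      cases hA' : diagonal_scan word matrix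
      · cases hB' : diagonal_scan_alt word matrix
        · rfl
        · exact absurd (hiff.mpr (hB.mp hB')) (by simp [hA'])
      · exact (hB.mpr (hiff.mp hA')).symm
    · -- some scanned window runs off a short row: Pre_ supplies a valid matching window,
      -- so both ports return true
      unfold pvNoBad at hnb
      push_neg at hnb
      obtain ⟨y, x, hylen, hx1, hxrow, hbad⟩ := hnb
      have hbad' : pvValidWinB matrix word.toList.length y x = false := by
        cases h : pvValidWinB matrix word.toList.length y x
        · rfl
        · exact absurd h hbad
      obtain ⟨y', hy', x', hx'1, hmatch⟩ :=
        pv_prescan_elim word.toList matrix hPre.2 y x hylen hxrow hx1 hbad'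
      rw [pvMatchWinB, Bool.and_eq_true, Bool.or_eq_true, beq_iff_eq, beq_iff_eq] at hmatch
      have hfound := pv_win_found word.toList matrix y' x' (by omega) hx'1 hmatch.1 hmatch.2
      rw [hB.mpr hfound, hA]
      rcases hfound with h | h
      · exact pv_found_win matrix word.toList word.toList rfl hlw h (Or.inl rfl)
      · exact pv_found_win matrix word.toList word.toList.reverse
          (by simp) hlw h (Or.inr (List.reverse_reverse _))
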